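-- pv_equiv track=rewrite | github.com/sisiyotakele/A2SV_Solved_Probelms | codeforces/1741D-Masha-and-a-Beautiful-Tree/1741D-Masha-and-a-Beautiful-Tree.py | solve
-- ===== SOURCE A (Python) =====
-- def solve(arr):
--     if len(arr) == 1:
--         return arr, 0
--
--     mid = len(arr) // 2
--     left, left_ops = solve(arr[:mid])
--     right, right_ops = solve(arr[mid:])
--
--     if left is None or right is None:
--         return None, 0
--
--     if max(left) < min(right):
--         return left + right, left_ops + right_ops
--
--     elif max(right) < min(left):
--         return right + left, left_ops + right_ops + 1
--
--     else:
--         return None, 0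
-- ===== SOURCE B (Python) =====
-- def _go(arr):
--     # returns (min, max, ops, ok) summary of the segment instead of the merged list
--     if len(arr) == 1:
--         return arr[0], arr[0], 0, True
--     mid = len(arr) // 2
--     lmn, lmx, lops, lok = _go(arr[:mid])
--     rmn, rmx, rops, rok = _go(arr[mid:])
--     if not (lok and rok):
--         return 0, 0, 0, False
--     if lmx < rmn:
--         return lmn, rmx, lops + rops, True
--     if rmx < lmn:
--         return rmn, lmx, lops + rops + 1, True
--     return 0, 0, 0, False
--
--
-- def solve(arr):
--     _, _, ops, ok = _go(arr)
--     if not ok: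
--         return None, 0
--     return sorted(arr), ops
-- ===== Notes on version B (the rewrite author's own statement) =====
-- stated objective: alternative
-- what changed: The recursion no longer builds and returns merged sublists with repeated min/max scans; a helper returns a (min, max, ops, ok) summary per half so each merge step is O(1) comparisons, and the final list is produced once by sorted(arr) at the top.
import Mathlib
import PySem

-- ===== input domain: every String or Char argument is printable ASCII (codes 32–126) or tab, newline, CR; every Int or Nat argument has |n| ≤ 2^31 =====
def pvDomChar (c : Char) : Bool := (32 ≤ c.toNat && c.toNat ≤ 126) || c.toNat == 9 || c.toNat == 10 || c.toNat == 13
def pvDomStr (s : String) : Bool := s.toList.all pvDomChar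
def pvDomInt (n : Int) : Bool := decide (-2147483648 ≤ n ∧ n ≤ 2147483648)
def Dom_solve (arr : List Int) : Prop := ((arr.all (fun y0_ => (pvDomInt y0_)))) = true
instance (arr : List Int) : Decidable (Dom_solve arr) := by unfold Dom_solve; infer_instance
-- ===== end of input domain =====

-- B replaces the list-returning recursion by a summary recursion (min, max, ops, ok)
-- over the same halves and one final sorted(arr); alternative decomposition, same cost.
-- Both Pythons recurse forever on [], so Pre_solve excludes the empty list.

-- ===== PORT A =====
-- arr[:mid] / arr[mid:] with 0 ≤ mid ≤ len are exactly take/drop.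
-- max(xs)/min(xs) are PySem.List.max?/min?; the lists returned by the recursive
-- calls are always nonempty, so the `none` fallback branch is unreachable.
-- The `arr.length = 0` guard only makes the Python infinite recursion total.
def solve (arr : List Int) : Option (List Int) × Int :=
  if arr.length = 1 then (some arr, 0)
  else if arr.length = 0 then (none, 0)  -- totality guard: Python diverges here (outside Pre_)
  else
    let mid := arr.length / 2
    let l := solve (arr.take mid)
    let r := solve (arr.drop mid)
    match l.1, r.1 with
    | some left, some right =>
      match PySem.List.max? left (fun x => x), PySem.List.min? right (fun x => x),
            PySem.List.max? right (fun x => x), PySem.List.min? left (fun x => x) with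
      | some lmx, some rmn, some rmx, some lmn =>
        if lmx < rmn then (some (left ++ right), l.2 + r.2)
        else if rmx < lmn then (some (right ++ left), l.2 + r.2 + 1)
        else (none, 0)
      | _, _, _, _ => (none, 0)  -- unreachable: left/right are nonempty
    | _, _ => (none, 0)
termination_by arr.length
decreasing_by
  · simp only [List.length_take]; omega
  · simp only [List.length_drop]; omega

-- ===== PORT B =====
-- helper _go: summary (min, max, ops, ok) of the segment
def solveGo (arr : List Int) : Int × Int × Int × Bool :=
  if arr.length = 1 then (arr.headI, arr.headI, 0, true)  -- arr[0]
  else if arr.length = 0 then (0, 0, 0, false)  -- totality guard: Python diverges here (outside Pre_)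
  else
    let mid := arr.length / 2
    let L := solveGo (arr.take mid)
    let R := solveGo (arr.drop mid)
    if !(L.2.2.2 && R.2.2.2) then (0, 0, 0, false)
    else if L.2.1 < R.1 then (L.1, R.2.1, L.2.2.1 + R.2.2.1, true)
    else if R.2.1 < L.1 then (R.1, L.2.1, L.2.2.1 + R.2.2.1 + 1, true)
    else (0, 0, 0, false)
termination_by arr.length
decreasing_by
  · simp only [List.length_take]; omega
  · simp only [List.length_drop]; omega

def solve_alt (arr : List Int) : Option (List Int) × Int :=
  let g := solveGo arr
  if !g.2.2.2 then (none, 0)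
  else (some (PySem.List.sorted arr (fun x => x) false), g.2.2.1)

-- ===== PRECONDITION & SPEC =====
-- Pre_ excludes only the empty list, on which both Pythons recurse without bound (RecursionError).
def Pre_solve (arr : List Int) : Prop := arr ≠ []
instance (arr : List Int) : Decidable (Pre_solve arr) := by unfold Pre_solve; infer_instance

def pvWitness_solve : List Int := [2, 1, 3, 4]

def Spec_solve (arr : List Int) (out : Option (List Int) × Int) : Prop := out = solve_alt arr
instance (arr : List Int) (out : Option (List Int) × Int) : Decidable (Spec_solve arr out) := by unfold Spec_solve; infer_instance

-- ===== CLAIM (what is proved, stated in full; the proofs are below) =====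
def Claim_equal_solve : Prop := ∀ (arr : List Int), Dom_solve arr → Pre_solve arr → Spec_solve arr (solve arr)

-- ===== LEMMAS AND PROOFS =====

-- a value that is a member and a lower bound IS what Python's min returns
theorem min?_eq_of_bounds (s : List Int) (m : Int) (hm : m ∈ s) (hb : ∀ x ∈ s, m ≤ x) :
    PySem.List.min? s (fun x => x) = some m := by
  cases h : PySem.List.min? s (fun x => x) with
  | none =>
    rw [PySem.List.min?_eq_none_iff] at h
    simp [h] at hm
  | some v =>
    have hv := PySem.List.min?_mem h
    have h1 := PySem.List.min?_isMin h m hm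
    have h2 := hb v hv
    simp only [Option.some.injEq]
    omega

theorem max?_eq_of_bounds (s : List Int) (m : Int) (hm : m ∈ s) (hb : ∀ x ∈ s, x ≤ m) :
    PySem.List.max? s (fun x => x) = some m := by
  cases h : PySem.List.max? s (fun x => x) with
  | none =>
    rw [PySem.List.max?_eq_none_iff] at h
    simp [h] at hm
  | some v =>
    have hv := PySem.List.max?_mem h
    have h1 := PySem.List.max?_isMax h m hm
    have h2 := hb v hv
    simp only [Option.some.injEq]
    omega

-- the joint invariant of A's recursion and B's summary recursion
def SolveInv (arr : List Int) : Prop :=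
  let g := solveGo arr
  (g.2.2.2 = true →
    ∃ s, solve arr = (some s, g.2.2.1) ∧ s.Perm arr ∧ s.Pairwise (· < ·) ∧
      g.1 ∈ s ∧ g.2.1 ∈ s ∧ (∀ x ∈ s, g.1 ≤ x ∧ x ≤ g.2.1)) ∧
  (g.2.2.2 = false → solve arr = (none, 0))

theorem inv_holds : ∀ (n : ℕ) (arr : List Int), arr.length = n → arr ≠ [] → SolveInv arr := by
  intro n
  induction n using Nat.strong_induction_on with
  | _ n ih =>
    intro arr hlen hne
    by_cases h1 : arr.length = 1
    · -- base: singleton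
      obtain ⟨a, rest, rfl⟩ := List.exists_cons_of_ne_nil hne
      have : rest = [] := by
        simp at h1; exact h1
      subst this
      constructor
      · intro _
        refine ⟨[a], ?_, List.Perm.refl _, by simp, by simp [solveGo], by simp [solveGo], ?_⟩
        · simp [solve, solveGo]
        · intro x hx; simp at hx; simp [solveGo, hx]
      · intro hfalse
        simp [solveGo] at hfalse
    · -- recursive case
      have h2 : 2 ≤ arr.length := by
        cases harr : arr.length with
        | zero => exact absurd (List.eq_nil_of_length_eq_zero harr) hne
        | succ k => omega
      set mid := arr.length / 2 with hmid
      have hmid1 : 1 ≤ mid := by omega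
      have hmidlt : mid < arr.length := by omega
      have hlt : (arr.take mid).length = mid := by simp; omega
      have hrt : (arr.drop mid).length = arr.length - mid := by simp
      have hlne : arr.take mid ≠ [] := by
        intro h; rw [h] at hlt; simp at hlt; omega
      have hrne : arr.drop mid ≠ [] := by
        intro h; rw [h] at hrt; simp at hrt; omega
      have ihl := ih (arr.take mid).length (by omega) (arr.take mid) rfl hlne
      have ihr := ih (arr.drop mid).length (by omega) (arr.drop mid) rfl hrne
      -- unfold one step of both recursions
      have hsolve : solve arr =
          (let l := solve (arr.take mid)
           let r := solve (arr.drop mid)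
           match l.1, r.1 with
           | some left, some right =>
             match PySem.List.max? left (fun x => x), PySem.List.min? right (fun x => x),
                   PySem.List.max? right (fun x => x), PySem.List.min? left (fun x => x) with
             | some lmx, some rmn, some rmx, some lmn =>
               if lmx < rmn then (some (left ++ right), l.2 + r.2)
               else if rmx < lmn then (some (right ++ left), l.2 + r.2 + 1)
               else (none, 0)
             | _, _, _, _ => (none, 0)
           | _, _ => (none, 0)) := by
        rw [solve]
        simp only [h1, if_false]
        have h0 : ¬ arr.length = 0 := by omega
        simp only [h0, if_false]
        rfl
      have hgo : solveGo arr =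
          (let L := solveGo (arr.take mid)
           let R := solveGo (arr.drop mid)
           if !(L.2.2.2 && R.2.2.2) then (0, 0, 0, false)
           else if L.2.1 < R.1 then (L.1, R.2.1, L.2.2.1 + R.2.2.1, true)
           else if R.2.1 < L.1 then (R.1, L.2.1, L.2.2.1 + R.2.2.1 + 1, true)
           else (0, 0, 0, false)) := by
        rw [solveGo]
        simp only [h1, if_false]
        have h0 : ¬ arr.length = 0 := by omega
        simp only [h0, if_false]
        rfl
      obtain ⟨ihlT, ihlF⟩ := ihl
      obtain ⟨ihrT, ihrF⟩ := ihr
      by_cases hLok : (solveGo (arr.take mid)).2.2.2 = true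
      · by_cases hRok : (solveGo (arr.drop mid)).2.2.2 = true
        · -- both children ok
          obtain ⟨sl, hslA, hslP, hslS, hlmn, hlmx, hlbd⟩ := ihlT hLok
          obtain ⟨sr, hsrA, hsrP, hsrS, hrmn, hrmx, hrbd⟩ := ihrT hRok
          have hmaxl := max?_eq_of_bounds sl _ hlmx (fun x hx => (hlbd x hx).2)
          have hminl := min?_eq_of_bounds sl _ hlmn (fun x hx => (hlbd x hx).1)
          have hmaxr := max?_eq_of_bounds sr _ hrmx (fun x hx => (hrbd x hx).2)
          have hminr := min?_eq_of_bounds sr _ hrmn (fun x hx => (hrbd x hx).1)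
          have hperm : (sl ++ sr).Perm arr := by
            have := List.Perm.append hslP hsrP
            rwa [List.take_append_drop] at this
          have hperm' : (sr ++ sl).Perm arr := (List.perm_append_comm).trans hperm
          unfold SolveInv
          rw [hsolve, hgo]
          simp only [hslA, hsrA, hmaxl, hminl, hmaxr, hminr, hLok, hRok, Bool.and_self,
            Bool.not_true]
          by_cases hc1 : (solveGo (arr.take mid)).2.1 < (solveGo (arr.drop mid)).1
          · -- left block below right block
            simp only [hc1, if_true, if_false, Bool.false_eq_true]
            constructor
            · intro _
              refine ⟨sl ++ sr, rfl, hperm, ?_, ?_, ?_, ?_⟩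
              · rw [List.pairwise_append]
                refine ⟨hslS, hsrS, ?_⟩
                intro x hx y hy
                have := (hlbd x hx).2
                have := (hrbd y hy).1
                omega
              · simp [hlmn]
              · simp [hrmx]
              · intro x hx
                rcases List.mem_append.mp hx with hx | hx
                · have h := hlbd x hx
                  have := (hrbd _ hrmx).1
                  constructor
                  · exact h.1
                  · omega
                · have h := hrbd x hx
                  have := (hlbd _ hlmn).2
                  constructor
                  · omega
                  · exact h.2
            · intro h; simp at h
          · by_cases hc2 : (solveGo (arr.drop mid)).2.1 < (solveGo (arr.take mid)).1
            · -- right block below left block: one swap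
              simp only [hc1, hc2, if_false, if_true, Bool.false_eq_true]
              constructor
              · intro _
                refine ⟨sr ++ sl, rfl, hperm', ?_, ?_, ?_, ?_⟩
                · rw [List.pairwise_append]
                  refine ⟨hsrS, hslS, ?_⟩
                  intro x hx y hy
                  have := (hrbd x hx).2
                  have := (hlbd y hy).1
                  omega
                · simp [hrmn]
                · simp [hlmx]
                · intro x hx
                  rcases List.mem_append.mp hx with hx | hx
                  · have h := hrbd x hx
                    have := (hlbd _ hlmn).2
                    constructor
                    · exact h.1
                    · omega
                  · have h := hlbd x hx
                    have := (hrbd _ hrmx).1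
                    constructor
                    · omega
                    · exact h.2
              · intro h; simp at h
            · -- neither: fail
              simp only [hc1, hc2, if_false, Bool.false_eq_true]
              refine ⟨fun h => ?_, fun _ => ?_⟩ <;> simp_all
        · -- right child failed
          have hR : (solveGo (arr.drop mid)).2.2.2 = false := by
            cases h : (solveGo (arr.drop mid)).2.2.2
            · rfl
            · exact absurd h hRok
          have hsrA := ihrF hR
          unfold SolveInv
          rw [hsolve, hgo]
          simp only [hsrA, hR, Bool.and_false, Bool.not_false, if_true]
          constructor
          · intro h; simp at h
          · intro _
            cases h : (solve (arr.take mid)).1 <;> simp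
      · -- left child failed
        have hL : (solveGo (arr.take mid)).2.2.2 = false := by
          cases h : (solveGo (arr.take mid)).2.2.2
          · rfl
          · exact absurd h hLok
        have hslA := ihlF hL
        unfold SolveInv
        rw [hsolve, hgo]
        simp only [hslA, hL, Bool.false_and, Bool.not_false, if_true]
        refine ⟨fun h => ?_, fun _ => ?_⟩ <;> simp_all

-- ===== VERDICT (by name: the statement is the Claim_ definition above) =====
theorem solve_spec : Claim_equal_solve := by
  intro arr _ hpre
  unfold Spec_solve solve_alt
  have hinv := inv_holds arr.length arr rfl hpre
  unfold SolveInv at hinv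
  obtain ⟨hT, hF⟩ := hinv
  cases hok : (solveGo arr).2.2.2 with
  | false =>
    rw [hF hok]
    simp [hok]
  | true =>
    obtain ⟨s, hA, hP, hS, _, _, _⟩ := hT hok
    rw [hA]
    simp only [hok, Bool.not_true, Bool.false_eq_true, reduceIte]
    have := PySem.List.sorted_eq_of_perm_of_pairwise_lt (xs := arr) (ys := s)
      (key := fun x => x) hP (by simpa using hS)
    rw [this]
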